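-- pv_equiv track=rewrite | github.com/Prudhvinaraya/leetcode | 2914-find-the-safest-path-in-a-grid/find-the-safest-path-in-a-grid.py | canAchieveSafeness
-- ===== SOURCE A (Python) =====
-- from collections import deque
--
-- def canAchieveSafeness(grid, safeness, threshold):
--     n = len(grid)
--     if safeness[0][0] < threshold:  # If the starting cell's safeness is less than the threshold
--         return False
--
--     queue = deque([(0, 0)])  # Start BFS from the top-left corner
--     visited = [[False] * n for _ in range(n)]
--     visited[0][0] = True
--
--     directions = [(-1, 0), (1, 0), (0, -1), (0, 1)]  # Possible directions for movement
--
--     # Perform BFS to check if the bottom-right corner can be reached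
--     while queue:
--         x, y = queue.popleft()
--         if x == n - 1 and y == n - 1:  # If we reach the bottom-right corner
--             return True
--
--         for dx, dy in directions:
--             newX, newY = x + dx, y + dy
--             # Check if the new cell is within bounds and its safeness is above the threshold
--             if 0 <= newX < n and 0 <= newY < n and not visited[newX][newY] and safeness[newX][newY] >= threshold:
--                 queue.append((newX, newY))
--                 visited[newX][newY] = True
--
--     return False
-- ===== SOURCE B (Python) =====
-- def canAchieveSafeness(grid, safeness, threshold):
--     n = len(grid)
--     if safeness[0][0] < threshold:
--         return False
--     reach = {(0, 0)}
--     for _ in range(n * n):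
--         frontier = {(i, j) for i in range(n) for j in range(n)
--                     if (i, j) not in reach and safeness[i][j] >= threshold
--                     and ((i - 1, j) in reach or (i + 1, j) in reach
--                          or (i, j - 1) in reach or (i, j + 1) in reach)}
--         if not frontier:
--             break
--         reach |= frontier
--     return (n - 1, n - 1) in reach
-- ===== Notes on version B (the rewrite author's own statement) =====
-- stated objective: alternative
-- what changed: Replaces the deque-based BFS with visited matrix by round-based frontier saturation: repeatedly sweep the whole grid collecting every unreached safe cell adjacent to the reached set until a fixed point, then test membership of the bottom-right cell.
-- outside the precondition, e.g. on canAchieveSafeness([[0, 0], [0, 0]], [[5, -9], [-9]], 0): A returns False, B raises IndexError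
import Mathlib
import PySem

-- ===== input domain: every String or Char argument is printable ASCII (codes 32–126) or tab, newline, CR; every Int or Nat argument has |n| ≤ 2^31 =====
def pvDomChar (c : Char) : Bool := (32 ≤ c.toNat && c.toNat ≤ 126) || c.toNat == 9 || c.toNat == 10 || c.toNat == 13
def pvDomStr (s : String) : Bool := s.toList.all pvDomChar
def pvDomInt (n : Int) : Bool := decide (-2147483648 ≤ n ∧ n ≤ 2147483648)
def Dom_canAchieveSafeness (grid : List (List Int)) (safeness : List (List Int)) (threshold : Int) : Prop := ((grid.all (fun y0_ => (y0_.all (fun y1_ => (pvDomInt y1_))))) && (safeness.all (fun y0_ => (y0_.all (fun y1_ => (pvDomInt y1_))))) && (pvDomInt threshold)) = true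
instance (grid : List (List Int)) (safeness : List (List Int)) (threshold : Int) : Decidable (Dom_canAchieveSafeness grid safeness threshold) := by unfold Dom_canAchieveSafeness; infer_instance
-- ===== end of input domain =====

-- B replaces A's deque BFS by round-based frontier saturation over the whole grid (alternative
-- algorithm, not claimed faster). Equivalence of the RETURN values is proved on Pre_ below.

-- ===== PORT A =====

-- shared 2-D read helper: exact for the in-bounds non-negative indices at which both Pythons
-- index `safeness` inside Pre_ (Python raises out of bounds; Pre_ excludes that).
def pvSget (s : List (List Int)) (i j : Int) : Int := (s.getD i.toNat []).getD j.toNat 0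

def pvVget (v : List (List Bool)) (i j : Int) : Bool := (v.getD i.toNat []).getD j.toNat false

def pvVset (v : List (List Bool)) (i j : Int) : List (List Bool) :=
  v.set i.toNat ((v.getD i.toNat []).set j.toNat true)

-- the BFS while-loop; fuel n*n bounds the number of pops (each pop consumes one enqueue,
-- and at most n*n cells are ever enqueued since each enqueue marks a fresh cell visited)
def pvBfs (safeness : List (List Int)) (threshold : Int) (n : Int) :
    Nat → List (Int × Int) → List (List Bool) → Bool
  | 0, _, _ => false
  | _ + 1, [], _ => false
  | fuel + 1, (x, y) :: rest, visited =>
    if x = n - 1 ∧ y = n - 1 then true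
    else
      let st := [((-1 : Int), (0 : Int)), (1, 0), (0, -1), (0, 1)].foldl
        (fun (st : List (Int × Int) × List (List Bool)) d =>
          let nX := x + d.1
          let nY := y + d.2
          if 0 ≤ nX ∧ nX < n ∧ 0 ≤ nY ∧ nY < n ∧ pvVget st.2 nX nY = false ∧
              threshold ≤ pvSget safeness nX nY
          then (st.1 ++ [(nX, nY)], pvVset st.2 nX nY)
          else st) (rest, visited)
      pvBfs safeness threshold n fuel st.1 st.2

def canAchieveSafeness (grid : List (List Int)) (safeness : List (List Int)) (threshold : Int) : Bool :=
  let n : Int := grid.length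
  if pvSget safeness 0 0 < threshold then false
  else
    pvBfs safeness threshold n (grid.length * grid.length) [(0, 0)]
      (pvVset (List.replicate grid.length (List.replicate grid.length false)) 0 0)

-- ===== PORT B =====

-- one sweep: the set comprehension collecting every unreached safe cell adjacent to `reach`
def pvFrontier (safeness : List (List Int)) (threshold : Int) (n : Int)
    (reach : PySem.Set (Int × Int)) : PySem.Set (Int × Int) :=
  PySem.Set.ofList
    ((PySem.List.pyRange 0 n 1).flatMap (fun i =>
      (PySem.List.pyRange 0 n 1).filterMap (fun j =>
        if (i, j) ∉ reach ∧ threshold ≤ pvSget safeness i j ∧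
            ((i - 1, j) ∈ reach ∨ (i + 1, j) ∈ reach ∨ (i, j - 1) ∈ reach ∨ (i, j + 1) ∈ reach)
        then some (i, j) else none)))

-- the for-loop over range(n*n) with its `break` on an empty frontier
def pvSat (safeness : List (List Int)) (threshold : Int) (n : Int) :
    Nat → PySem.Set (Int × Int) → PySem.Set (Int × Int)
  | 0, reach => reach
  | fuel + 1, reach =>
    let f := pvFrontier safeness threshold n reach
    if f = [] then reach
    else pvSat safeness threshold n fuel (PySem.Set.union reach f)

def canAchieveSafeness_alt (grid : List (List Int)) (safeness : List (List Int)) (threshold : Int) : Bool :=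
  let n : Int := grid.length
  if pvSget safeness 0 0 < threshold then false
  else
    decide ((n - 1, n - 1) ∈
      pvSat safeness threshold n (grid.length * grid.length) (PySem.Set.ofList [((0 : Int), (0 : Int))]))

-- ===== PRECONDITION & SPEC =====
-- Pre_ excludes exactly the inputs on which one of the Pythons raises IndexError: no
-- safeness[0][0] entry; an empty grid whose safe start makes A assign visited[0][0]; and
-- safeness smaller than n x n with a safe start, where A's BFS may raise and, when A happens
-- to return False without reaching a missing entry, B's whole-grid sweep raises instead.
def Pre_canAchieveSafeness (grid : List (List Int)) (safeness : List (List Int)) (threshold : Int) : Prop :=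
  0 < safeness.length ∧ 0 < (safeness.getD 0 []).length ∧
  ((safeness.getD 0 []).getD 0 0 < threshold ∨
    (grid ≠ [] ∧ grid.length ≤ safeness.length ∧
      ∀ row ∈ safeness.take grid.length, grid.length ≤ row.length))
instance (grid : List (List Int)) (safeness : List (List Int)) (threshold : Int) : Decidable (Pre_canAchieveSafeness grid safeness threshold) := by unfold Pre_canAchieveSafeness; infer_instance

def pvWitness_canAchieveSafeness : List (List Int) × List (List Int) × Int := ([[0]], [[1]], 0)

def Spec_canAchieveSafeness (grid : List (List Int)) (safeness : List (List Int)) (threshold : Int) (out : Bool) : Prop := out = canAchieveSafeness_alt grid safeness threshold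
instance (grid : List (List Int)) (safeness : List (List Int)) (threshold : Int) (out : Bool) : Decidable (Spec_canAchieveSafeness grid safeness threshold out) := by unfold Spec_canAchieveSafeness; infer_instance

-- ===== CLAIM (what is proved, stated in full; the proofs are below) =====
def Claim_equal_canAchieveSafeness : Prop := ∀ (grid : List (List Int)) (safeness : List (List Int)) (threshold : Int), Dom_canAchieveSafeness grid safeness threshold → Pre_canAchieveSafeness grid safeness threshold → Spec_canAchieveSafeness grid safeness threshold (canAchieveSafeness grid safeness threshold)
-- ===== LEMMAS AND PROOFS =====

-- ---- proof-side vocabulary ----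

def pvInB (n : Int) (c : Int × Int) : Prop := 0 ≤ c.1 ∧ c.1 < n ∧ 0 ≤ c.2 ∧ c.2 < n

def pvDims (nn : Nat) (v : List (List Bool)) : Prop := v.length = nn ∧ ∀ row ∈ v, row.length = nn

def pvAdj (a b : Int × Int) : Prop :=
  (b.1 = a.1 - 1 ∧ b.2 = a.2) ∨ (b.1 = a.1 + 1 ∧ b.2 = a.2) ∨
  (b.1 = a.1 ∧ b.2 = a.2 - 1) ∨ (b.1 = a.1 ∧ b.2 = a.2 + 1)

-- one BFS/saturation edge: move to an adjacent in-bounds cell meeting the threshold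
def pvStepR (sf : List (List Int)) (th : Int) (nn : Nat) (a b : Int × Int) : Prop :=
  pvAdj a b ∧ pvInB (nn : Int) b ∧ th ≤ pvSget sf b.1 b.2

def pvReach (sf : List (List Int)) (th : Int) (nn : Nat) (c : Int × Int) : Prop :=
  Relation.ReflTransGen (pvStepR sf th nn) (0, 0) c

-- the edge relation restricted to yet-unvisited targets, and "the BFS will succeed from queue q"
def pvRelv (sf : List (List Int)) (th : Int) (nn : Nat) (v : List (List Bool)) (a b : Int × Int) : Prop :=
  pvStepR sf th nn a b ∧ pvVget v b.1 b.2 = false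

def pvRq (sf : List (List Int)) (th : Int) (nn : Nat) (v : List (List Bool))
    (q : List (Int × Int)) : Prop :=
  ∃ u ∈ q, Relation.ReflTransGen (pvRelv sf th nn v) u ((nn : Int) - 1, (nn : Int) - 1)

def pvNbrs (u : Int × Int) : List (Int × Int) :=
  [(u.1 + -1, u.2 + 0), (u.1 + 1, u.2 + 0), (u.1 + 0, u.2 + -1), (u.1 + 0, u.2 + 1)]

-- the BFS inner-loop body, cell-level view (defeq to the port's direction-level fold body)
def pvBody (sf : List (List Int)) (th : Int) (n : Int)
    (st : List (Int × Int) × List (List Bool)) (c : Int × Int) :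
    List (Int × Int) × List (List Bool) :=
  if 0 ≤ c.1 ∧ c.1 < n ∧ 0 ≤ c.2 ∧ c.2 < n ∧ pvVget st.2 c.1 c.2 = false ∧
      th ≤ pvSget sf c.1 c.2
  then (st.1 ++ [c], pvVset st.2 c.1 c.2)
  else st

def pvCondB (sf : List (List Int)) (th : Int) (n : Int) (v : List (List Bool)) (c : Int × Int) : Bool :=
  decide (0 ≤ c.1 ∧ c.1 < n ∧ 0 ≤ c.2 ∧ c.2 < n ∧ pvVget v c.1 c.2 = false ∧
      th ≤ pvSget sf c.1 c.2)

def pvMark (v : List (List Bool)) (l : List (Int × Int)) : List (List Bool) :=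
  l.foldl (fun v c => pvVset v c.1 c.2) v

def pvCells (nn : Nat) : List (Int × Int) :=
  ((List.range nn) ×ˢ (List.range nn)).map (fun p => ((p.1 : Int), (p.2 : Int)))

def pvU (nn : Nat) (v : List (List Bool)) : Nat :=
  (pvCells nn).countP (fun c => !pvVget v c.1 c.2)

-- ---- grid-matrix lemmas ----

theorem pvDims_pvVset {nn : Nat} {v : List (List Bool)} (hd : pvDims nn v)
    {c : Int × Int} (hc : pvInB (nn : Int) c) : pvDims nn (pvVset v c.1 c.2) := by
  obtain ⟨h1, h2⟩ := hd
  obtain ⟨a1, a2, b1, b2⟩ := hc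
  constructor
  · simp [pvVset, h1]
  · intro row hrow
    rcases List.mem_or_eq_of_mem_set hrow with h | h
    · exact h2 _ h
    · subst h
      have hlt : c.1.toNat < v.length := by omega
      rw [List.getD_eq_getElem v [] hlt]
      simp [h2 _ (List.getElem_mem hlt)]

theorem pvVget_pvVset {nn : Nat} {v : List (List Bool)} (hd : pvDims nn v)
    {c d : Int × Int} (hc : pvInB (nn : Int) c) (hdb : pvInB (nn : Int) d) :
    pvVget (pvVset v c.1 c.2) d.1 d.2 = if d = c then true else pvVget v d.1 d.2 := by
  obtain ⟨h1, h2⟩ := hd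
  obtain ⟨a1, a2, b1, b2⟩ := hc
  obtain ⟨e1, e2, f1, f2⟩ := hdb
  have hlt : c.1.toNat < v.length := by omega
  have hrl : v[c.1.toNat].length = nn := h2 _ (List.getElem_mem hlt)
  by_cases hy : d = c
  · subst hy
    simp only [pvVset, pvVget, List.getD]
    rw [List.getElem?_set_self (by omega)]
    simp only [Option.getD_some]
    rw [List.getElem?_eq_getElem hlt]
    simp only [Option.getD_some]
    rw [List.getElem?_set_self (by omega)]
    simp
  · simp only [pvVset, pvVget, List.getD, if_neg hy]
    by_cases hx : d.1.toNat = c.1.toNat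
    · have hxv : d.1 = c.1 := by omega
      have hyv : d.2 ≠ c.2 := by
        intro h; exact hy (Prod.ext hxv h)
      rw [hx, List.getElem?_set_self (by omega)]
      simp only [Option.getD_some]
      rw [List.getElem?_eq_getElem hlt]
      simp only [Option.getD_some]
      rw [List.getElem?_set_ne (by omega)]
    · rw [List.getElem?_set_ne (fun h => hx h.symm)]

theorem pvVget_blank {nn : Nat} {d : Int × Int} (hdb : pvInB (nn : Int) d) :
    pvVget (List.replicate nn (List.replicate nn false)) d.1 d.2 = false := by
  obtain ⟨e1, e2, f1, f2⟩ := hdb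
  simp only [pvVget, List.getD]
  rw [List.getElem?_replicate]
  by_cases h : d.1.toNat < nn
  · simp only [if_pos h, Option.getD_some]
    rw [List.getElem?_replicate]
    by_cases h2 : d.2.toNat < nn
    · simp [h2]
    · simp [h2]
  · simp [h]

theorem pvDims_blank (nn : Nat) : pvDims nn (List.replicate nn (List.replicate nn false)) := by
  constructor
  · simp
  · intro row hrow
    simp_all [List.eq_of_mem_replicate hrow]

theorem pvVget_v0 {nn : Nat} (h1 : 1 ≤ nn) {d : Int × Int} (hdb : pvInB (nn : Int) d) :
    pvVget (pvVset (List.replicate nn (List.replicate nn false)) 0 0) d.1 d.2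
      = decide (d = (0, 0)) := by
  have h00 : pvInB (nn : Int) ((0 : Int), (0 : Int)) := by
    refine ⟨le_refl _, by omega, le_refl _, by omega⟩
  have := pvVget_pvVset (pvDims_blank nn) (c := ((0:Int),(0:Int))) h00 hdb
  simp only at this
  rw [this]
  by_cases h : d = ((0:Int), (0:Int))
  · simp [h]
  · simp [h, pvVget_blank hdb]

theorem pvDims_v0 {nn : Nat} (h1 : 1 ≤ nn) :
    pvDims nn (pvVset (List.replicate nn (List.replicate nn false)) 0 0) := by
  have h00 : pvInB (nn : Int) ((0 : Int), (0 : Int)) := by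
    refine ⟨le_refl _, by omega, le_refl _, by omega⟩
  exact pvDims_pvVset (pvDims_blank nn) (c := ((0:Int),(0:Int))) h00

-- ---- counting lemmas ----

theorem pvMem_pvCells {nn : Nat} {c : Int × Int} : c ∈ pvCells nn ↔ pvInB (nn : Int) c := by
  obtain ⟨x, y⟩ := c
  simp only [pvCells, pvInB, List.mem_map, Prod.exists, List.mem_product, List.mem_range,
    Prod.mk.injEq]
  constructor
  · rintro ⟨a, b, ⟨ha, hb⟩, rfl, rfl⟩; simp; omega
  · rintro ⟨h1, h2, h3, h4⟩
    exact ⟨x.toNat, y.toNat, ⟨by omega, by omega⟩, by omega, by omega⟩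

theorem pvNodup_pvCells (nn : Nat) : (pvCells nn).Nodup := by
  apply List.Nodup.map
  · intro p q h; simp [Prod.ext_iff] at h; exact Prod.ext (by omega) (by omega)
  · exact List.Nodup.product (List.nodup_range) (List.nodup_range)

theorem pvLength_pvCells (nn : Nat) : (pvCells nn).length = nn * nn := by
  simp [pvCells, List.length_product]

theorem pvCountP_flip {α : Type} (l : List α) (hl : l.Nodup) (c : α) (hc : c ∈ l)
    (p q : α → Bool) (hagree : ∀ x ∈ l, x ≠ c → q x = p x) (hqc : q c = false)
    (hpc : p c = true) : l.countP q + 1 = l.countP p := by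
  induction l with
  | nil => simp at hc
  | cons x l ih =>
    rcases List.mem_cons.mp hc with h | h
    · subst h
      have hnx : c ∉ l := (List.nodup_cons.mp hl).1
      have : l.countP q = l.countP p := by
        apply List.countP_congr
        intro a ha
        rw [hagree a (List.mem_cons_of_mem _ ha) (fun he => hnx (he ▸ ha))]
      simp [hqc, hpc, this]
    · have hxc : x ≠ c := fun he => (List.nodup_cons.mp hl).1 (he ▸ h)
      have hx : q x = p x := hagree x List.mem_cons_self hxc
      have := ih (List.nodup_cons.mp hl).2 h
        (fun a ha hac => hagree a (List.mem_cons_of_mem _ ha) hac)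
      simp only [List.countP_cons, hx]
      omega

theorem pvU_pvVset {nn : Nat} {v : List (List Bool)} (hd : pvDims nn v) {c : Int × Int}
    (hc : pvInB (nn : Int) c) (hun : pvVget v c.1 c.2 = false) :
    pvU nn (pvVset v c.1 c.2) + 1 = pvU nn v := by
  unfold pvU
  apply pvCountP_flip (pvCells nn) (pvNodup_pvCells nn) c (pvMem_pvCells.mpr hc)
  · intro x hx hxc
    rw [pvVget_pvVset hd hc (pvMem_pvCells.mp hx)]
    simp [hxc]
  · rw [pvVget_pvVset hd hc hc]
    simp
  · simp [hun]

theorem pvU_blank (nn : Nat) : pvU nn (List.replicate nn (List.replicate nn false)) = nn * nn := by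
  unfold pvU
  rw [List.countP_eq_length.mpr, pvLength_pvCells]
  intro c hcm
  simp [pvVget_blank (pvMem_pvCells.mp hcm)]

theorem pvLength_le_of_inB {nn : Nat} {l : List (Int × Int)} (hnd : l.Nodup)
    (hin : ∀ c ∈ l, pvInB (nn : Int) c) : l.length ≤ nn * nn := by
  have hsub : l ⊆ pvCells nn := fun c hcl => pvMem_pvCells.mpr (hin c hcl)
  have := List.Subperm.length_le (List.Nodup.subperm hnd hsub)
  rwa [pvLength_pvCells] at this

-- ---- marking a list of cells ----

theorem pvDims_pvMark {nn : Nat} {l : List (Int × Int)} (hin : ∀ c ∈ l, pvInB (nn : Int) c) :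
    ∀ {v : List (List Bool)}, pvDims nn v → pvDims nn (pvMark v l) := by
  induction l with
  | nil => intro v hd; exact hd
  | cons c l ih =>
    intro v hd
    have hc := hin c List.mem_cons_self
    exact ih (fun e he => hin e (List.mem_cons_of_mem _ he)) (pvDims_pvVset hd hc)

theorem pvVget_pvMark {nn : Nat} {l : List (Int × Int)} (hin : ∀ c ∈ l, pvInB (nn : Int) c) :
    ∀ {v : List (List Bool)}, pvDims nn v → ∀ {d : Int × Int}, pvInB (nn : Int) d →
      (pvVget (pvMark v l) d.1 d.2 = true ↔ pvVget v d.1 d.2 = true ∨ d ∈ l) := by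
  induction l with
  | nil => intro v hd d hdb; simp [pvMark]
  | cons c l ih =>
    intro v hd d hdb
    have hc := hin c List.mem_cons_self
    have hrec := ih (fun e he => hin e (List.mem_cons_of_mem _ he)) (pvDims_pvVset hd hc) hdb
    show pvVget (pvMark (pvVset v c.1 c.2) l) d.1 d.2 = true ↔ _
    rw [hrec, pvVget_pvVset hd hc hdb]
    by_cases hdc : d = c
    · simp [hdc]
    · simp [hdc, List.mem_cons]

theorem pvU_pvMark {nn : Nat} {l : List (Int × Int)} (hnd : l.Nodup) :
    ∀ {v : List (List Bool)}, pvDims nn v →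
      (∀ c ∈ l, pvInB (nn : Int) c ∧ pvVget v c.1 c.2 = false) →
      pvU nn (pvMark v l) + l.length = pvU nn v := by
  induction l with
  | nil => intro v hd _; simp [pvMark]
  | cons c l ih =>
    intro v hd hprop
    obtain ⟨hc, hun⟩ := hprop c List.mem_cons_self
    have hnd' := (List.nodup_cons.mp hnd).2
    have hcn : c ∉ l := (List.nodup_cons.mp hnd).1
    have hrec := ih hnd' (v := pvVset v c.1 c.2) (pvDims_pvVset hd hc) ?_
    · show pvU nn (pvMark (pvVset v c.1 c.2) l) + (l.length + 1) = pvU nn v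
      have := pvU_pvVset hd hc hun
      omega
    · intro e he
      obtain ⟨he1, he2⟩ := hprop e (List.mem_cons_of_mem _ he)
      refine ⟨he1, ?_⟩
      rw [pvVget_pvVset hd hc he1, if_neg (fun h : e = c => hcn (h ▸ he))]
      exact he2

-- ---- the neighbour fold of port A ----

theorem pvNbrs_nodup (u : Int × Int) : (pvNbrs u).Nodup := by
  simp [pvNbrs, Prod.ext_iff]

theorem pvMem_pvNbrs {u c : Int × Int} : c ∈ pvNbrs u ↔ pvAdj u c := by
  simp [pvNbrs, pvAdj, Prod.ext_iff]
  omega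

theorem pvFold_eq (sf : List (List Int)) (th : Int) (nn : Nat) (cs : List (Int × Int)) :
    ∀ (q : List (Int × Int)) (v : List (List Bool)), cs.Nodup → pvDims nn v →
      cs.foldl (pvBody sf th (nn : Int)) (q, v)
        = (q ++ cs.filter (pvCondB sf th (nn : Int) v), pvMark v (cs.filter (pvCondB sf th (nn : Int) v))) := by
  induction cs with
  | nil => intro q v _ _; simp [pvMark]
  | cons c cs ih =>
    intro q v hnd hd
    have hnd' := (List.nodup_cons.mp hnd).2
    have hcn : c ∉ cs := (List.nodup_cons.mp hnd).1
    by_cases hc : 0 ≤ c.1 ∧ c.1 < (nn : Int) ∧ 0 ≤ c.2 ∧ c.2 < (nn : Int) ∧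
        pvVget v c.1 c.2 = false ∧ th ≤ pvSget sf c.1 c.2
    · have hcB : pvCondB sf th (nn : Int) v c = true := by
        simp [pvCondB, hc]
      have hinb : pvInB (nn : Int) c := ⟨hc.1, hc.2.1, hc.2.2.1, hc.2.2.2.1⟩
      have hfeq : cs.filter (pvCondB sf th (nn : Int) (pvVset v c.1 c.2))
          = cs.filter (pvCondB sf th (nn : Int) v) := by
        apply List.filter_congr
        intro e he
        by_cases hinbe : pvInB (nn : Int) e
        · have hv : pvVget (pvVset v c.1 c.2) e.1 e.2 = pvVget v e.1 e.2 := by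
            rw [pvVget_pvVset hd hinb hinbe, if_neg (fun h : e = c => hcn (h ▸ he))]
          unfold pvCondB
          rw [hv]
        · unfold pvCondB
          simp only [decide_eq_decide]
          unfold pvInB at hinbe
          constructor
          · rintro ⟨h1, h2, h3, h4, _⟩; exact (hinbe ⟨h1, h2, h3, h4⟩).elim
          · rintro ⟨h1, h2, h3, h4, _⟩; exact (hinbe ⟨h1, h2, h3, h4⟩).elim
      have hstep : List.foldl (pvBody sf th (nn : Int)) (q, v) (c :: cs)
          = List.foldl (pvBody sf th (nn : Int)) (q ++ [c], pvVset v c.1 c.2) cs := by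
        simp [pvBody, hc]
      rw [hstep, ih (q ++ [c]) (pvVset v c.1 c.2) hnd' (pvDims_pvVset hd hinb), hfeq]
      rw [List.filter_cons_of_pos hcB]
      simp [pvMark]
    · have hcB : pvCondB sf th (nn : Int) v c = false := by
        simp only [pvCondB, decide_eq_false_iff_not]; exact hc
      have hstep : List.foldl (pvBody sf th (nn : Int)) (q, v) (c :: cs)
          = List.foldl (pvBody sf th (nn : Int)) (q, v) cs := by
        simp [pvBody, hc]
      rw [hstep, ih q v hnd' hd, List.filter_cons_of_neg (by simp [hcB])]

theorem pvMem_filterN {sf : List (List Int)} {th : Int} {nn : Nat} {v : List (List Bool)}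
    {u c : Int × Int} :
    c ∈ (pvNbrs u).filter (pvCondB sf th (nn : Int) v) ↔ pvRelv sf th nn v u c := by
  rw [List.mem_filter, pvMem_pvNbrs]
  simp only [pvCondB, decide_eq_true_eq]
  unfold pvRelv pvStepR pvInB
  tauto

-- ---- transfer of "BFS will succeed" across one pop ----

theorem pvRq_step {sf : List (List Int)} {th : Int} {nn : Nat} {v : List (List Bool)}
    {u : Int × Int} {rest : List (Int × Int)} (hd : pvDims nn v)
    (hu : ((nn : Int) - 1, (nn : Int) - 1) ≠ u) :
    (pvRq sf th nn (pvMark v ((pvNbrs u).filter (pvCondB sf th (nn : Int) v)))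
        (rest ++ (pvNbrs u).filter (pvCondB sf th (nn : Int) v))
      ↔ pvRq sf th nn v (u :: rest)) := by
  have charN : ∀ c, c ∈ (pvNbrs u).filter (pvCondB sf th (nn : Int) v) ↔
      pvRelv sf th nn v u c := fun c => pvMem_filterN
  have hinN : ∀ c ∈ (pvNbrs u).filter (pvCondB sf th (nn : Int) v), pvInB (nn : Int) c :=
    fun c hc => ((charN c).mp hc).1.2.1
  have charV : ∀ d : Int × Int, pvInB (nn : Int) d →
      (pvVget (pvMark v ((pvNbrs u).filter (pvCondB sf th (nn : Int) v))) d.1 d.2 = true ↔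
        pvVget v d.1 d.2 = true ∨ d ∈ (pvNbrs u).filter (pvCondB sf th (nn : Int) v)) :=
    fun d hdb => pvVget_pvMark hinN hd hdb
  constructor
  · rintro ⟨w, hw, p⟩
    have mono : ∀ a b : Int × Int,
        pvRelv sf th nn (pvMark v ((pvNbrs u).filter (pvCondB sf th (nn : Int) v))) a b →
        pvRelv sf th nn v a b := by
      rintro a b ⟨hs, hvf⟩
      refine ⟨hs, ?_⟩
      cases h : pvVget v b.1 b.2
      · rfl
      · rw [(charV b hs.2.1).mpr (Or.inl h)] at hvf
        exact absurd hvf (by simp)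
    have p' := Relation.ReflTransGen.mono mono p
    rcases List.mem_append.mp hw with h | h
    · exact ⟨w, List.mem_cons_of_mem _ h, p'⟩
    · exact ⟨u, List.mem_cons_self, Relation.ReflTransGen.head (pvMem_filterN.mp h) p'⟩
  · rintro ⟨w, hw, p⟩
    have hw' : w = u ∨ w ∈ rest := List.mem_cons.mp hw
    have key : ∀ c, Relation.ReflTransGen (pvRelv sf th nn v) w c →
        ((∃ w' ∈ rest ++ (pvNbrs u).filter (pvCondB sf th (nn : Int) v),
            Relation.ReflTransGen
              (pvRelv sf th nn (pvMark v ((pvNbrs u).filter (pvCondB sf th (nn : Int) v)))) w' c)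
          ∨ c = u) := by
      intro c hc
      induction hc with
      | refl =>
        rcases hw' with h | h
        · right; exact h
        · left; exact ⟨w, List.mem_append_left _ h, Relation.ReflTransGen.refl⟩
      | @tail b c hab hbc ihx =>
        rcases ihx with ⟨w', hw'', p''⟩ | hbu
        · by_cases hcN : c ∈ (pvNbrs u).filter (pvCondB sf th (nn : Int) v)
          · left; exact ⟨c, List.mem_append_right _ hcN, Relation.ReflTransGen.refl⟩
          · left
            refine ⟨w', hw'', p''.tail ⟨hbc.1, ?_⟩⟩
            cases h : pvVget (pvMark v ((pvNbrs u).filter (pvCondB sf th (nn : Int) v))) c.1 c.2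
            · rfl
            · rcases (charV c hbc.1.2.1).mp h with hv | hN
              · rw [hbc.2] at hv; exact absurd hv (by simp)
              · exact absurd hN hcN
        · subst hbu
          left
          exact ⟨c, List.mem_append_right _ ((charN c).mpr hbc), Relation.ReflTransGen.refl⟩
    rcases key _ p with ⟨w', hw'', p''⟩ | ht
    · exact ⟨w', hw'', p''⟩
    · exact absurd ht (by exact fun h => hu h)

-- ---- the BFS loop returns true exactly when the target is queue-reachable ----

theorem pvBfs_iff (sf : List (List Int)) (th : Int) (nn : Nat) :
    ∀ (fuel : Nat) (q : List (Int × Int)) (v : List (List Bool)), pvDims nn v →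
      q.length + pvU nn v ≤ fuel →
      (pvBfs sf th (nn : Int) fuel q v = true ↔ pvRq sf th nn v q) := by
  intro fuel
  induction fuel with
  | zero =>
    intro q v hd hm
    have hq : q = [] := List.length_eq_zero_iff.mp (by omega)
    subst hq
    simp [pvBfs, pvRq]
  | succ fuel ih =>
    intro q v hd hm
    rcases q with _ | ⟨⟨x, y⟩, rest⟩
    · simp [pvBfs, pvRq]
    · by_cases ht : x = (nn : Int) - 1 ∧ y = (nn : Int) - 1
      · simp only [pvBfs, if_pos ht, true_iff]
        exact ⟨(x, y), List.mem_cons_self,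
          by rw [show ((nn : Int) - 1, (nn : Int) - 1) = (x, y) from Prod.ext ht.1.symm ht.2.symm]⟩
      · have hfold : List.foldl
            (fun (st : List (Int × Int) × List (List Bool)) d =>
              let nX := x + d.1
              let nY := y + d.2
              if 0 ≤ nX ∧ nX < (nn : Int) ∧ 0 ≤ nY ∧ nY < (nn : Int) ∧
                  pvVget st.2 nX nY = false ∧ th ≤ pvSget sf nX nY
              then (st.1 ++ [(nX, nY)], pvVset st.2 nX nY)
              else st) (rest, v) [((-1 : Int), (0 : Int)), (1, 0), (0, -1), (0, 1)]
            = List.foldl (pvBody sf th (nn : Int)) (rest, v) (pvNbrs (x, y)) := rfl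
        have hN : ∀ c ∈ (pvNbrs (x, y)).filter (pvCondB sf th (nn : Int) v),
            pvInB (nn : Int) c ∧ pvVget v c.1 c.2 = false :=
          fun c hc => ⟨(pvMem_filterN.mp hc).1.2.1, (pvMem_filterN.mp hc).2⟩
        have hndN : ((pvNbrs (x, y)).filter (pvCondB sf th (nn : Int) v)).Nodup :=
          (pvNbrs_nodup _).filter _
        have hU := pvU_pvMark hndN hd hN
        have hstep : pvBfs sf th (nn : Int) (fuel + 1) ((x, y) :: rest) v
            = pvBfs sf th (nn : Int) fuel
                (rest ++ (pvNbrs (x, y)).filter (pvCondB sf th (nn : Int) v))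
                (pvMark v ((pvNbrs (x, y)).filter (pvCondB sf th (nn : Int) v))) := by
          simp only [pvBfs, if_neg ht]
          rw [hfold, pvFold_eq sf th nn (pvNbrs (x, y)) rest v (pvNbrs_nodup _) hd]
        rw [hstep, ih _ _ (pvDims_pvMark (fun c hc => (hN c hc).1) hd)
          (by simp only [List.length_append]; simp only [List.length_cons] at hm; omega)]
        exact pvRq_step hd
          (fun h => ht ⟨(Prod.ext_iff.mp h).1.symm, (Prod.ext_iff.mp h).2.symm⟩)

theorem pvRtg_avoid {α : Type} {r : α → α → Prop} {a b : α}
    (h : Relation.ReflTransGen r a b) :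
    b = a ∨ Relation.ReflTransGen (fun x y => r x y ∧ y ≠ a) a b := by
  induction h with
  | refl => left; rfl
  | @tail b c h1 h2 ihx =>
    by_cases hc : c = a
    · left; exact hc
    · right
      rcases ihx with hba | p
      · exact Relation.ReflTransGen.single ⟨hba ▸ h2, hc⟩
      · exact p.tail ⟨h2, hc⟩

theorem pvA_iff (sf : List (List Int)) (th : Int) (nn : Nat) (h1 : 1 ≤ nn) :
    (pvBfs sf th (nn : Int) (nn * nn) [(0, 0)]
        (pvVset (List.replicate nn (List.replicate nn false)) 0 0) = true
      ↔ pvReach sf th nn ((nn : Int) - 1, (nn : Int) - 1)) := by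
  have h00 : pvInB (nn : Int) ((0 : Int), (0 : Int)) := ⟨le_refl _, by omega, le_refl _, by omega⟩
  have hUv0 : pvU nn (pvVset (List.replicate nn (List.replicate nn false)) 0 0) + 1 = nn * nn := by
    have h := pvU_pvVset (c := ((0 : Int), (0 : Int))) (pvDims_blank nn) h00 (pvVget_blank h00)
    rw [pvU_blank nn] at h
    simpa using h
  rw [pvBfs_iff sf th nn (nn * nn) [(0, 0)]
    (pvVset (List.replicate nn (List.replicate nn false)) 0 0) (pvDims_v0 h1)
    (by simp only [List.length_cons, List.length_nil]; omega)]
  constructor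
  · rintro ⟨u, hu, p⟩
    have hu0 : u = ((0 : Int), (0 : Int)) := by simpa using hu
    subst hu0
    exact Relation.ReflTransGen.mono (fun a b h => h.1) p
  · intro hR
    rcases pvRtg_avoid hR with h0 | p
    · exact ⟨(0, 0), List.mem_cons_self, h0 ▸ Relation.ReflTransGen.refl⟩
    · refine ⟨(0, 0), List.mem_cons_self, Relation.ReflTransGen.mono ?_ p⟩
      rintro a b ⟨hr, hbne⟩
      refine ⟨hr, ?_⟩
      rw [pvVget_v0 h1 hr.2.1]
      simp [hbne]

-- ---- port-B side: the frontier sweep and the saturation loop ----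

theorem pvFrontier_char {sf : List (List Int)} {th : Int} {nn : Nat}
    {reach : PySem.Set (Int × Int)} {c : Int × Int} :
    c ∈ pvFrontier sf th (nn : Int) reach ↔
      c ∉ reach ∧ pvInB (nn : Int) c ∧ th ≤ pvSget sf c.1 c.2 ∧ ∃ u ∈ reach, pvAdj u c := by
  constructor
  · intro h
    simp only [pvFrontier, PySem.Set.mem_ofList, List.mem_flatMap, List.mem_filterMap] at h
    obtain ⟨i, hi, j, hj, hsome⟩ := h
    rw [PySem.List.mem_pyRange_one] at hi hj
    split_ifs at hsome with hP
    · obtain ⟨hP1, hP2, hP3⟩ := hP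
      have hc : c = (i, j) := (Option.some_inj.mp hsome).symm
      subst hc
      refine ⟨hP1, ⟨hi.1, hi.2, hj.1, hj.2⟩, hP2, ?_⟩
      rcases hP3 with h | h | h | h
      · exact ⟨(i - 1, j), h, by simp [pvAdj]⟩
      · exact ⟨(i + 1, j), h, by simp [pvAdj]⟩
      · exact ⟨(i, j - 1), h, by simp [pvAdj]⟩
      · exact ⟨(i, j + 1), h, by simp [pvAdj]⟩
  · rintro ⟨hnr, hinb, hth, u, hu, hadj⟩
    simp only [pvFrontier, PySem.Set.mem_ofList, List.mem_flatMap, List.mem_filterMap]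
    obtain ⟨hb1, hb2, hb3, hb4⟩ := hinb
    refine ⟨c.1, PySem.List.mem_pyRange_one.mpr ⟨hb1, hb2⟩,
            c.2, PySem.List.mem_pyRange_one.mpr ⟨hb3, hb4⟩, ?_⟩
    have hcond : (c.1, c.2) ∉ reach ∧ th ≤ pvSget sf c.1 c.2 ∧
        ((c.1 - 1, c.2) ∈ reach ∨ (c.1 + 1, c.2) ∈ reach ∨
          (c.1, c.2 - 1) ∈ reach ∨ (c.1, c.2 + 1) ∈ reach) := by
      refine ⟨fun h => hnr h, hth, ?_⟩
      rcases hadj with ⟨h1, h2⟩ | ⟨h1, h2⟩ | ⟨h1, h2⟩ | ⟨h1, h2⟩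
      · exact Or.inr (Or.inl ((show ((c.1 : Int) + 1, c.2) = u from Prod.ext (by omega) (by omega)) ▸ hu))
      · exact Or.inl ((show ((c.1 : Int) - 1, c.2) = u from Prod.ext (by omega) (by omega)) ▸ hu)
      · exact Or.inr (Or.inr (Or.inr ((show ((c.1 : Int), c.2 + 1) = u from Prod.ext (by omega) (by omega)) ▸ hu)))
      · exact Or.inr (Or.inr (Or.inl ((show ((c.1 : Int), c.2 - 1) = u from Prod.ext (by omega) (by omega)) ▸ hu)))
    rw [if_pos hcond]

theorem pvSat_props (sf : List (List Int)) (th : Int) (nn : Nat) :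
    ∀ (fuel : Nat) (reach : PySem.Set (Int × Int)), reach.Nodup →
      (∀ c ∈ reach, pvInB (nn : Int) c) → nn * nn + 1 ≤ reach.length + fuel →
      ((∀ c ∈ reach, c ∈ pvSat sf th (nn : Int) fuel reach) ∧
       (∀ c ∈ pvSat sf th (nn : Int) fuel reach,
          ∃ u ∈ reach, Relation.ReflTransGen (pvStepR sf th nn) u c) ∧
       (∀ u ∈ pvSat sf th (nn : Int) fuel reach, ∀ c, pvStepR sf th nn u c →
          c ∈ pvSat sf th (nn : Int) fuel reach)) := by
  intro fuel
  induction fuel with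
  | zero =>
    intro reach hnd hin hcard
    have := pvLength_le_of_inB hnd hin
    exact absurd hcard (by omega)
  | succ fuel ih =>
    intro reach hnd hin hcard
    by_cases hf : pvFrontier sf th (nn : Int) reach = []
    · simp only [pvSat, if_pos hf]
      refine ⟨fun c hc => hc, fun c hc => ⟨c, hc, Relation.ReflTransGen.refl⟩, ?_⟩
      intro u hu c hstep
      by_cases hcr : c ∈ reach
      · exact hcr
      · exfalso
        have : c ∈ pvFrontier sf th (nn : Int) reach :=
          pvFrontier_char.mpr ⟨hcr, hstep.2.1, hstep.2.2, ⟨u, hu, hstep.1⟩⟩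
        rw [hf] at this
        simp at this
    · simp only [pvSat, if_neg hf]
      have hmem' : ∀ x : Int × Int,
          x ∈ PySem.Set.union reach (pvFrontier sf th (nn : Int) reach) ↔
            x ∈ reach ∨ x ∈ pvFrontier sf th (nn : Int) reach :=
        fun x => PySem.Set.mem_union _ _ x
      have hnd' : (PySem.Set.union reach (pvFrontier sf th (nn : Int) reach)).Nodup :=
        PySem.Set.nodup_union _ _ hnd
      have hin' : ∀ c ∈ PySem.Set.union reach (pvFrontier sf th (nn : Int) reach),
          pvInB (nn : Int) c := by
        intro c hc
        rcases (hmem' c).mp hc with h | h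
        · exact hin c h
        · exact (pvFrontier_char.mp h).2.1
      have hlen' : reach.length < (PySem.Set.union reach (pvFrontier sf th (nn : Int) reach)).length := by
        obtain ⟨x, hx⟩ := List.exists_mem_of_ne_nil _ hf
        have hxnr : x ∉ reach := (pvFrontier_char.mp hx).1
        have hsub : x :: reach ⊆ PySem.Set.union reach (pvFrontier sf th (nn : Int) reach) := by
          intro e he
          rcases List.mem_cons.mp he with h | h
          · exact (hmem' e).mpr (Or.inr (h ▸ hx))
          · exact (hmem' e).mpr (Or.inl h)
        have := List.Subperm.length_le ((List.nodup_cons.mpr ⟨hxnr, hnd⟩).subperm hsub)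
        simpa using this
      obtain ⟨ha, hb, hc⟩ := ih _ hnd' hin' (by omega)
      refine ⟨fun c hcr => ha c ((hmem' c).mpr (Or.inl hcr)), ?_, hc⟩
      intro c hcF
      obtain ⟨u, hu', p⟩ := hb c hcF
      rcases (hmem' u).mp hu' with h | h
      · exact ⟨u, h, p⟩
      · obtain ⟨_, huin, huth, w, hw, hadj⟩ := pvFrontier_char.mp h
        exact ⟨w, hw, Relation.ReflTransGen.head ⟨hadj, huin, huth⟩ p⟩

theorem pvB_iff (sf : List (List Int)) (th : Int) (nn : Nat) (h1 : 1 ≤ nn) :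
    (((nn : Int) - 1, (nn : Int) - 1) ∈
        pvSat sf th (nn : Int) (nn * nn) (PySem.Set.ofList [((0 : Int), (0 : Int))])
      ↔ pvReach sf th nn ((nn : Int) - 1, (nn : Int) - 1)) := by
  have hnd0 : (PySem.Set.ofList [((0 : Int), (0 : Int))]).Nodup := by simp
  have hin0 : ∀ c ∈ PySem.Set.ofList [((0 : Int), (0 : Int))], pvInB (nn : Int) c := by
    intro c hc
    have : c = ((0 : Int), (0 : Int)) := by simpa [PySem.Set.ofList] using hc
    subst this
    exact ⟨le_refl _, by omega, le_refl _, by omega⟩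
  obtain ⟨ha, hb, hcl⟩ := pvSat_props sf th nn (nn * nn) (PySem.Set.ofList [((0 : Int), (0 : Int))])
    hnd0 hin0 (by simp [PySem.Set.ofList])
  constructor
  · intro hmem
    obtain ⟨u, hu, p⟩ := hb _ hmem
    have hu0 : u = ((0 : Int), (0 : Int)) := by simpa [PySem.Set.ofList] using hu
    subst hu0
    exact p
  · intro hR
    have key : ∀ c, Relation.ReflTransGen (pvStepR sf th nn) (0, 0) c →
        c ∈ pvSat sf th (nn : Int) (nn * nn) (PySem.Set.ofList [((0 : Int), (0 : Int))]) := by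
      intro c hc
      induction hc with
      | refl => exact ha _ (by simp [PySem.Set.ofList])
      | @tail b c h1 h2 ihx => exact hcl _ ihx _ h2
    exact key _ hR


-- ===== VERDICT (by name: the statement is the Claim_ definition above) =====
theorem canAchieveSafeness_spec : Claim_equal_canAchieveSafeness := by
  intro grid safeness threshold _hdom hpre
  unfold Spec_canAchieveSafeness
  show canAchieveSafeness grid safeness threshold = canAchieveSafeness_alt grid safeness threshold
  unfold canAchieveSafeness canAchieveSafeness_alt
  by_cases hg : pvSget safeness 0 0 < threshold
  · simp [hg]
  · simp only [hg, if_false]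
    by_cases hnn : grid.length = 0
    · rw [hnn]
      have hgrid : grid = [] := List.length_eq_zero_iff.mp hnn
      subst hgrid
      simp [pvBfs, pvSat]
    · have h1 : 1 ≤ grid.length := Nat.one_le_iff_ne_zero.mpr hnn
      have hA := pvA_iff safeness threshold grid.length h1
      have hB := pvB_iff safeness threshold grid.length h1
      rw [Bool.eq_iff_iff, hA, decide_eq_true_iff, hB]
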